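-- pv_equiv track=rewrite | github.com/AdamYang011/NYCU_Crypto_engineering | hw3/hw3.py | get_group_word
-- ===== SOURCE A (Python) =====
-- def get_group_word(key_len,text):
--     block_list = []
--     tmp = ""
--     for m in range(key_len):
--         j = m
--         while(j < len(text)):
--             tmp += text[j]
--             j = j + key_len
--         block_list.append(tmp)
--         tmp = ""
--     return block_list
-- ===== SOURCE B (Python) =====
-- def get_group_word(key_len, text):
--     if key_len <= 0:
--         return []
--     block_list = ["" for _ in range(key_len)]
--     for i, ch in enumerate(text):
--         block_list[i % key_len] += ch
--     return block_list
-- ===== Notes on version B (the rewrite author's own statement) =====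
-- stated objective: alternative
-- what changed: Replaces the column-major nested strided scan (one inner while-loop over the text per key column) with a single row-major pass that distributes each character into bucket i % key_len of a pre-sized list.
import Mathlib
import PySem

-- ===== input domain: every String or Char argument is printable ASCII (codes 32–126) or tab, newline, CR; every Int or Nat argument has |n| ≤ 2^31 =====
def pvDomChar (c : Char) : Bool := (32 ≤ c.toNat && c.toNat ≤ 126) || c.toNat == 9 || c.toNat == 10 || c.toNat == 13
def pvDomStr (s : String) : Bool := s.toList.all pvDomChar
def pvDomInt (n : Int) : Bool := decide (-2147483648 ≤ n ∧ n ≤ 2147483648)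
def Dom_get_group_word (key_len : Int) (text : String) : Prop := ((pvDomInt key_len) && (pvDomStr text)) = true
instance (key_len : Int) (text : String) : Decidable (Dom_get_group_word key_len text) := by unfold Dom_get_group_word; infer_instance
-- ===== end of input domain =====

-- B is a single forward pass distributing characters into key_len buckets by index mod key_len,
-- instead of A's one strided inner scan of the text per column.

-- ===== PORT A =====
-- inner 'while j < len(text): tmp += text[j]; j = j + key_len' (0 < k is the termination guard;
-- A only runs this loop with key_len ≥ 1, since m ranges over range(key_len))
def pvWhileA (t : List Char) (k : Nat) (j : Nat) : List Char :=
  if h : j < t.length ∧ 0 < k then t[j]'h.1 :: pvWhileA t k (j + k) else []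
termination_by t.length - j
decreasing_by omega

def get_group_word (key_len : Int) (text : String) : List String :=
  (PySem.List.pyRange 0 key_len 1).foldl
    (fun block_list m => block_list ++ [String.mk (pvWhileA text.toList key_len.toNat m.toNat)]) []

-- ===== PORT B =====
def get_group_word_alt (key_len : Int) (text : String) : List String :=
  if key_len ≤ 0 then []
  else
    ((PySem.List.enumerate text.toList 0).foldl
      (fun bs p =>
        bs.set (PySem.Int.mod p.1 (key_len.toNat : Int)).toNat
          (bs[(PySem.Int.mod p.1 (key_len.toNat : Int)).toNat]! ++ [p.2]))
      (List.replicate key_len.toNat [])).map String.mk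

-- ===== PRECONDITION & SPEC =====
def Spec_get_group_word (key_len : Int) (text : String) (out : List String) : Prop := out = get_group_word_alt key_len text
instance (key_len : Int) (text : String) (out : List String) : Decidable (Spec_get_group_word key_len text out) := by unfold Spec_get_group_word; infer_instance

-- ===== CLAIM (what is proved, stated in full; the proofs are below) =====
def Claim_equal_get_group_word : Prop := ∀ (key_len : Int) (text : String), Dom_get_group_word key_len text → Spec_get_group_word key_len text (get_group_word key_len text)

-- ===== LEMMAS AND PROOFS =====

-- characterisation: the characters of l (whose first element carries index i0) landing in column m
def pvSel (l : List Char) (i0 k m : Nat) : List Char :=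
  match l with
  | [] => []
  | c :: rest => (if i0 % k = m then [c] else []) ++ pvSel rest (i0 + 1) k m

lemma pvSel_skip (t : List Char) (k m : Nat) :
    ∀ n a b, b - a ≤ n → a ≤ b → (∀ p, a ≤ p → p < b → p % k ≠ m) →
      pvSel (t.drop a) a k m = pvSel (t.drop b) b k m := by
  intro n
  induction n with
  | zero =>
    intro a b h1 h2 _
    have hab : a = b := by omega
    subst hab
    rfl
  | succ n ih =>
    intro a b h1 h2 hp
    by_cases hab : a = b
    · rw [hab]
    · by_cases ha : a < t.length
      · rw [List.drop_eq_getElem_cons ha]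
        simp only [pvSel, if_neg (hp a le_rfl (by omega)), List.nil_append]
        exact ih (a + 1) b (by omega) (by omega) (fun p hp1 hp2 => hp p (by omega) hp2)
      · rw [List.drop_eq_nil_of_le (by omega), List.drop_eq_nil_of_le (by omega)]
        rfl

lemma pvWhileA_eq_sel (t : List Char) (k : Nat) (hk : 0 < k) :
    ∀ n j, t.length - j ≤ n → pvWhileA t k j = pvSel (t.drop j) j k (j % k) := by
  intro n
  induction n with
  | zero =>
    intro j h
    rw [pvWhileA, dif_neg (by omega), List.drop_eq_nil_of_le (by omega)]
    rfl
  | succ n ih =>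
    intro j h
    rw [pvWhileA]
    by_cases hj : j < t.length
    · rw [dif_pos ⟨hj, hk⟩, List.drop_eq_getElem_cons hj]
      simp only [pvSel]
      rw [if_pos trivial]
      rw [List.singleton_append]
      congr 1
      have h1 : pvWhileA t k (j + k) = pvSel (t.drop (j + k)) (j + k) k ((j + k) % k) :=
        ih (j + k) (by omega)
      rw [h1, Nat.add_mod_right]
      refine (pvSel_skip t k (j % k) (k - 1) (j + 1) (j + k) (by omega) (by omega) ?_).symm
      intro p hp1 hp2 hmod
      have hd : k ∣ p - j := (Nat.modEq_iff_dvd' (by omega)).mp hmod.symm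
      have := Nat.le_of_dvd (by omega) hd
      omega
    · rw [dif_neg (by omega), List.drop_eq_nil_of_le (by omega)]
      rfl

-- the single inner pass of A over the whole text equals pvSel from 0, for m < k
lemma pvWhileA_eq_sel_zero (t : List Char) (k m : Nat) (hk0 : 0 < k) (hm : m < k) :
    pvWhileA t k m = pvSel t 0 k m := by
  rw [pvWhileA_eq_sel t k hk0 t.length m (by omega), Nat.mod_eq_of_lt hm]
  have := pvSel_skip t k m m 0 m (by omega) (by omega)
    (fun p hp1 hp2 => by rw [Nat.mod_eq_of_lt (by omega)]; omega)
  rw [← this, List.drop_zero]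

-- B's distributing fold: length invariant and per-bucket contents
lemma pvDist_spec (k : Nat) (hk : 0 < k) :
    ∀ (l : List Char) (s : Nat) (bs : List (List Char)), bs.length = k →
      ((PySem.List.enumerate l (s : Int)).foldl
        (fun bs p =>
          bs.set (PySem.Int.mod p.1 (k : Int)).toNat
            (bs[(PySem.Int.mod p.1 (k : Int)).toNat]! ++ [p.2])) bs).length = k ∧
      ∀ m, m < k →
        ((PySem.List.enumerate l (s : Int)).foldl
          (fun bs p =>
            bs.set (PySem.Int.mod p.1 (k : Int)).toNat
              (bs[(PySem.Int.mod p.1 (k : Int)).toNat]! ++ [p.2])) bs)[m]! = bs[m]! ++ pvSel l s k m := by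
  intro l
  induction l with
  | nil =>
    intro s bs hbs
    simp [PySem.List.enumerate_nil, pvSel, hbs]
  | cons c rest ih =>
    intro s bs hbs
    rw [PySem.List.enumerate_cons]
    have hidx : (PySem.Int.mod ((s : Nat) : Int) ((k : Nat) : Int)).toNat = s % k := by
      rw [PySem.Int.mod_natCast]; exact Int.toNat_natCast _
    have hcast : ((s : Nat) : Int) + 1 = (((s + 1 : Nat)) : Int) := by push_cast; ring
    simp only [List.foldl_cons, hidx, hcast]
    obtain ⟨ihl, ihe⟩ := ih (s + 1) (bs.set (s % k) (bs[s % k]! ++ [c])) (by simp [hbs])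
    refine ⟨ihl, ?_⟩
    intro m hm
    rw [ihe m hm]
    by_cases hms : s % k = m
    · rw [hms, List.getElem!_eq_getElem?_getD,
        List.getElem?_set_eq_of_lt _ (by omega), Option.getD_some]
      simp [pvSel, hms, List.append_assoc]
    · rw [List.getElem!_eq_getElem?_getD, List.getElem?_set_ne hms,
        ← List.getElem!_eq_getElem?_getD]
      simp [pvSel, hms]

-- foldl-append-singleton is map
lemma pvFoldl_append_map {α β : Type} (f : α → β) :
    ∀ (l : List α) (acc : List β),
      l.foldl (fun acc x => acc ++ [f x]) acc = acc ++ l.map f := by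
  intro l
  induction l with
  | nil => simp
  | cons x xs ih => intro acc; simp [ih, List.append_assoc]

-- ===== VERDICT (by name: the statement is the Claim_ definition above) =====
theorem get_group_word_spec : Claim_equal_get_group_word := by
  intro key_len text _
  unfold Spec_get_group_word get_group_word get_group_word_alt
  by_cases hk : key_len ≤ 0
  · rw [if_pos hk, PySem.List.pyRange_one_eq_nil (by omega)]
    rfl
  · rw [if_neg hk]
    set t := text.toList with ht
    set k := key_len.toNat with hkk
    have hk0 : 0 < k := by omega
    have hklk : (k : Int) = key_len := by omega
    rw [pvFoldl_append_map, List.nil_append]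
    rw [← hklk, PySem.List.pyRange_zero_natCast]
    obtain ⟨hlen, helem⟩ := pvDist_spec k hk0 t 0 (List.replicate k []) (by simp)
    simp only [Nat.cast_zero] at hlen helem
    apply List.ext_getElem
    · simp only [List.length_map, List.length_range, hlen]
    · intro m h1 h2
      simp only [List.getElem_map, List.getElem_range, Int.toNat_natCast]
      have hm : m < k := by simpa using h1
      have hmv := helem m hm
      rw [List.getElem!_eq_getElem?_getD, List.getElem?_eq_getElem (by omega)] at hmv
      simp only [Option.getD_some] at hmv
      rw [pvWhileA_eq_sel_zero t k m hk0 hm, hmv]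
      simp [hm]
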